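-- pv_equiv track=rewrite | github.com/Niamortrih/rechercheia | evaluationpio.py | make_range_combo
-- ===== SOURCE A (Python) =====
-- def make_range_combo(val):
--     sr = ""
--     for i in range(1326):
--         if i != val:
--             sr += "0 "
--         else:
--             sr += "1 "
--     return sr
-- ===== SOURCE B (Python) =====
-- def make_range_combo(val):
--     if 0 <= val < 1326:
--         return "0 " * val + "1 " + "0 " * (1325 - val)
--     return "0 " * 1326
-- ===== Notes on version B (the rewrite author's own statement) =====
-- stated objective: simpler
-- what changed: Replaces the fixed-length loop that appends one token per index with a closed-form construction: a range check on val and three string repetitions/concatenations.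
import Mathlib
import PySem

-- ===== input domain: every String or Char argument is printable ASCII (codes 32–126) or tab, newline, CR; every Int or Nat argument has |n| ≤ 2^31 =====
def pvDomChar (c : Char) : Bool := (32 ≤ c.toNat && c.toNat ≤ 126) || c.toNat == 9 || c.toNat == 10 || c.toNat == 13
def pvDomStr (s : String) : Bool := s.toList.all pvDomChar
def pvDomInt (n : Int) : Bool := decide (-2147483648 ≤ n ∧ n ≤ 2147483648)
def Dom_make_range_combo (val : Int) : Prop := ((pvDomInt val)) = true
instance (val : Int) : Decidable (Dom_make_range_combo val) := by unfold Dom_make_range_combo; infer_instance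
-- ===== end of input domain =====

-- B replaces A's per-index append loop with a range check and three string repetitions (closed form).

-- ===== PORT A =====
-- strings are ported as List Char (PySem.Chars convention), wrapped into String at the end
def make_range_combo (val : Int) : String :=
  String.ofList ((PySem.List.pyRange 0 1326 1).foldl
    (fun sr i => if i ≠ val then sr ++ ['0', ' '] else sr ++ ['1', ' ']) [])

-- ===== PORT B =====
def make_range_combo_alt (val : Int) : String :=
  if 0 ≤ val ∧ val < 1326 then
    String.ofList (PySem.List.pyRepeat ['0', ' '] val ++ ['1', ' '] ++
               PySem.List.pyRepeat ['0', ' '] (1325 - val))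
  else
    String.ofList (PySem.List.pyRepeat ['0', ' '] 1326)

-- ===== PRECONDITION & SPEC =====
def Spec_make_range_combo (val : Int) (out : String) : Prop := out = make_range_combo_alt val
instance (val : Int) (out : String) : Decidable (Spec_make_range_combo val out) := by unfold Spec_make_range_combo; infer_instance

-- ===== CLAIM (what is proved, stated in full; the proofs are below) =====
def Claim_equal_make_range_combo : Prop := ∀ (val : Int), Dom_make_range_combo val → Spec_make_range_combo val (make_range_combo val)

-- ===== LEMMAS AND PROOFS =====

-- characterisation of A's loop: fold over range n yields the closed form
theorem make_range_combo_loop (n : Nat) (val : Int) (acc : List Char) :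
    (PySem.List.pyRange 0 (n : Int) 1).foldl
      (fun sr i => if i ≠ val then sr ++ ['0', ' '] else sr ++ ['1', ' ']) acc =
    acc ++ (if 0 ≤ val ∧ val < (n : Int) then
        (List.replicate val.toNat ['0', ' ']).flatten ++ ['1', ' '] ++
        (List.replicate (n - 1 - val.toNat) ['0', ' ']).flatten
      else (List.replicate n ['0', ' ']).flatten) := by
  induction n generalizing acc with
  | zero =>
      rw [PySem.List.pyRange_one_eq_nil (by norm_num)]
      simp
  | succ m ih =>
      have hcast : ((m + 1 : Nat) : Int) = (m : Int) + 1 := by push_cast; ring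
      rw [hcast, PySem.List.pyRange_one_succ_right (by positivity), List.foldl_append]
      simp only [List.foldl_cons, List.foldl_nil]
      rw [ih]
      by_cases hv : (m : Int) = val
      · -- this step appends "1 "; previous condition was false since val = m
        have h1 : ¬ (0 ≤ val ∧ val < (m : Int)) := by omega
        have h2 : 0 ≤ val ∧ val < (m : Int) + 1 := by omega
        have h3 : val.toNat = m := by omega
        simp only [hv, ne_eq, not_true_eq_false, if_false, h3]
        simp
        exact fun hneg => absurd hneg (by omega)
      · -- this step appends "0 "
        by_cases hin : 0 ≤ val ∧ val < (m : Int)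
        · have h2 : 0 ≤ val ∧ val < (m : Int) + 1 := by omega
          have h3 : m + 1 - 1 - val.toNat = (m - 1 - val.toNat) + 1 := by omega
          simp only [if_pos hin, if_pos h2, ne_eq, hv, not_false_eq_true, if_true, h3,
            List.replicate_succ', List.flatten_append, List.append_assoc]
          simp
        · have h2 : ¬ (0 ≤ val ∧ val < (m : Int) + 1) := by
            rcases lt_or_ge val 0 with h | h
            · omega
            · omega
          simp only [if_neg hin, if_neg h2, ne_eq, hv, not_false_eq_true, if_true,
            List.replicate_succ', List.flatten_append, List.append_assoc]
          simp

-- "0 " * n (pyRepeat) as a replicate, with a symbolic count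
theorem pyRepeat_zeros (n : Int) :
    PySem.List.pyRepeat ['0', ' '] n = (List.replicate n.toNat ['0', ' ']).flatten := by
  simp [PySem.List.pyRepeat]

-- ===== VERDICT (by name: the statement is the Claim_ definition above) =====
theorem make_range_combo_spec : Claim_equal_make_range_combo := by
  intro val _
  unfold Spec_make_range_combo make_range_combo make_range_combo_alt
  have h := make_range_combo_loop 1326 val []
  simp only [Nat.cast_ofNat] at h
  rw [h]
  by_cases hv : 0 ≤ val ∧ val < 1326
  · rw [if_pos hv, if_pos hv, pyRepeat_zeros, pyRepeat_zeros,
      show (1325 - val).toNat = 1326 - 1 - val.toNat from by omega, List.nil_append]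
  · rw [if_neg hv, if_neg hv, pyRepeat_zeros,
      show ((1326 : Int)).toNat = 1326 from by omega, List.nil_append]
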